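-- pv_equiv track=rewrite | github.com/arxanas/advent-of-code | year2022/utils/_funs.py | only
-- ===== SOURCE A (Python) =====
-- from typing import Callable, Iterable, Optional, Sequence, TypeVar, cast
--
-- T = TypeVar("T")
--
-- def only(seq: Iterable[T]) -> Optional[T]:
--     """Return the only element of the iterable, or return None if the iterable
--     is empty or has more than one element."""
--     seen_elem = False
--     to_return = None
--     for elem in seq:
--         if seen_elem:
--             return None
--         to_return = elem
--         seen_elem = True
--     if not seen_elem:
--         return None
--     return to_return
-- ===== SOURCE B (Python) =====
-- def only(seq):
--     try:
--         (x,) = seq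
--     except ValueError:
--         return None
--     return x
-- ===== Notes on version B (the rewrite author's own statement) =====
-- stated objective: idiomatic
-- what changed: Replaces the two-flag manual loop with exception-driven single-element tuple unpacking ((x,) = seq), letting the interpreter's unpack protocol decide the exactly-one case.
import Mathlib
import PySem

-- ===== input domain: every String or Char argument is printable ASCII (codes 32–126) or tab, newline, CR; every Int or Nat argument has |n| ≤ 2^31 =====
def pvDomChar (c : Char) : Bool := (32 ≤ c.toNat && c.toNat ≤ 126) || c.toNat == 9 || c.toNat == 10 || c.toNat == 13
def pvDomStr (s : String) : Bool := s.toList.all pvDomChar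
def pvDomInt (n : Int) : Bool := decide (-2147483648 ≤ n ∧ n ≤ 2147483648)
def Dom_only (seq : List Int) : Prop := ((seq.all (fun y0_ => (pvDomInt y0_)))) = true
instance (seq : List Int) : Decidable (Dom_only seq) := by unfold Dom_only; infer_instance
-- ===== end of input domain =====

-- B replaces A's two-flag manual loop with exception-driven single-element tuple unpacking (idiomatic); return value only.


-- ===== PORT A =====
-- the for-loop with its two accumulators (seen_elem, to_return) and the early 'return None'
def onlyLoop (seq : List Int) (seenElem : Bool) (toReturn : Option Int) : Option Int :=
  match seq with
  | [] => if !seenElem then none else toReturn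
  | elem :: rest =>
      if seenElem then none
      else onlyLoop rest true (some elem)

def only (seq : List Int) : Option Int := onlyLoop seq false none

-- ===== PORT B =====
-- try: (x,) = seq; return x  except ValueError: return None
-- single-element unpack succeeds exactly on a one-element sequence; that is this match
def only_alt (seq : List Int) : Option Int :=
  match seq with
  | [x] => some x
  | _ => none

-- ===== PRECONDITION & SPEC =====
def Spec_only (seq : List Int) (out : Option Int) : Prop := out = only_alt seq
instance (seq : List Int) (out : Option Int) : Decidable (Spec_only seq out) := by unfold Spec_only; infer_instance

-- ===== CLAIM =====
def Claim_equal_only : Prop := ∀ (seq : List Int), Dom_only seq → Spec_only seq (only seq)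

-- ===== LEMMAS AND PROOFS =====

-- ===== VERDICT =====
theorem only_spec : Claim_equal_only := by
  intro seq _
  unfold Spec_only only only_alt
  match seq with
  | [] => rfl
  | [a] => simp [onlyLoop]
  | a :: b :: rest => simp [onlyLoop]
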